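-- pv_equiv track=rewrite | github.com/amirk85/web-scrapping-cbuae | utils.py | extract_text_by_headers
-- ===== SOURCE A (Python) =====
-- from typing import Dict, List
--
-- def extract_text_by_headers(
--     text_lines: List[str], headers: List[str]
-- ) -> Dict[str, List[str]]:
--     header_dict = {}
--     current_header = None
--     current_text = []
--
--     for line in text_lines:
--         line = line.strip()  # Remove leading/trailing whitespace
--         if line in headers:
--             # If we encounter a new header
--             if current_header:
--                 # Store the previous header and its text if it exists
--                 header_dict[current_header] = current_text
--
--             # Update the current header and reset the current text
--             current_header = line
--             current_text = []
--         elif current_header: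
--             # Add the line to the current header's text
--             current_text.append(line)
--
--     # Add the last header and its text if it exists
--     if current_header:
--         header_dict[current_header] = current_text
--
--     return header_dict
-- ===== SOURCE B (Python) =====
-- def extract_text_by_headers(text_lines, headers):
--     header_set = set(headers)
--     stripped = [line.strip() for line in text_lines]
--     marks = [i for i, s in enumerate(stripped) if s in header_set]
--     ends = marks[1:] + [len(stripped)]
--     header_dict = {}
--     for i, end in zip(marks, ends):
--         header_dict[stripped[i]] = stripped[i + 1:end]
--     return header_dict
-- ===== Notes on version B (the rewrite author's own statement) =====
-- stated objective: faster
-- what changed: A's single stateful forward scan with an O(h) list-membership test per line is replaced by marker-index collection (set membership) followed by slicing the text between consecutive markers; Pre_ excludes only inputs where an empty-named marker actually occurs ('' listed as a header and some line stripping to empty), where A's truthiness test makes that marker a terminator that can never become a key while B records it like any other header - a degenerate corner neither value of which anyone would specify.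
-- outside the precondition, e.g. on extract_text_by_headers(['x', '', 'y'], ['']): A returns {}, B returns {'': ['y']}
import Mathlib
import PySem

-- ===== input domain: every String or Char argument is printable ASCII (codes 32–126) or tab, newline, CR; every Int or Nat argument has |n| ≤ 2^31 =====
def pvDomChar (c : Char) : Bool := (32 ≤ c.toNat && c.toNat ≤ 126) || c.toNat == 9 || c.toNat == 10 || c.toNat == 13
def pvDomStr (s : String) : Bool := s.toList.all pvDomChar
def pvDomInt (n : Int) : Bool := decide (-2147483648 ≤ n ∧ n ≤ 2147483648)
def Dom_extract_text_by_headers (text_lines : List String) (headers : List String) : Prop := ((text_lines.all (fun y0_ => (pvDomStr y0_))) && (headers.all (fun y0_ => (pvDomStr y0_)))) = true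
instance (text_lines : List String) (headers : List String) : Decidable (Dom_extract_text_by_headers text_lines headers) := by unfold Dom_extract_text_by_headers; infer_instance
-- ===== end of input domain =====

-- B replaces A's stateful forward scan (O(h) list membership per line) by collecting the
-- marker indices with set membership and slicing the text between consecutive markers
-- (objective: faster).

-- ===== PORT A =====
-- current_header: Python's None and '' are both falsy and the variable is only ever read
-- through its truthiness test 'if current_header:'; under Pre_ ('' is not a header) no
-- header line strips to '', so encoding None as "" is exact.
def extract_text_by_headers (text_lines : List String) (headers : List String) : List (String × List String) :=
  let st := text_lines.foldl
    (fun (st : PySem.Dict String (List String) × String × List String) line =>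
      let line := PySem.Str.strip line
      if line ∈ headers then
        ((if st.2.1 ≠ "" then st.1.insert st.2.1 st.2.2 else st.1), line, [])
      else if st.2.1 ≠ "" then (st.1, st.2.1, st.2.2 ++ [line])
      else st)
    (PySem.Dict.empty, "", [])
  (if st.2.1 ≠ "" then st.1.insert st.2.1 st.2.2 else st.1).items

-- ===== PORT B =====
-- Source B: strip once, list the marker indices (enumerate + set membership), pair each
-- marker with the next one (zip marks with marks[1:] + [len]), assign the slices.
def extract_text_by_headers_alt (text_lines : List String) (headers : List String) : List (String × List String) :=
  let headerSet : PySem.Set String := PySem.Set.ofList headers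
  let stripped := text_lines.map PySem.Str.strip
  let marks := ((PySem.List.enumerate stripped).filter
      (fun p => PySem.Set.contains headerSet p.2)).map Prod.fst
  let ends := PySem.List.slice marks (some 1) none ++ [(stripped.length : Int)]
  ((marks.zip ends).foldl
    (fun (d : PySem.Dict String (List String)) p =>
      d.insert (PySem.List.pyGetD stripped p.1 "")
               (PySem.List.slice stripped (some (p.1 + 1)) (some p.2)))
    PySem.Dict.empty).items

-- ===== PRECONDITION & SPEC =====
-- Pre_ excludes the inputs where an empty-named marker actually occurs (the empty string
-- is listed as a header AND some line strips to empty): there A's truthiness test makes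
-- the marker a terminator that can never become a key, while B records it like any other
-- header — a degenerate corner neither value of which anyone would specify (A still
-- returns a value there).
def Pre_extract_text_by_headers (text_lines : List String) (headers : List String) : Prop :=
  ¬ ("" ∈ headers ∧ ∃ l ∈ text_lines, PySem.Str.strip l = "")
instance (text_lines : List String) (headers : List String) : Decidable (Pre_extract_text_by_headers text_lines headers) := by unfold Pre_extract_text_by_headers; infer_instance
def pvWitness_extract_text_by_headers : List String × List String :=
  (["Intro", " a ", "b", "Body", "c"], ["Intro", "Body"])
def Spec_extract_text_by_headers (text_lines : List String) (headers : List String) (out : List (String × List String)) : Prop := out = extract_text_by_headers_alt text_lines headers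
instance (text_lines : List String) (headers : List String) (out : List (String × List String)) : Decidable (Spec_extract_text_by_headers text_lines headers out) := by unfold Spec_extract_text_by_headers; infer_instance

-- ===== CLAIM (what is proved, stated in full; the proofs are below) =====
def Claim_equal_extract_text_by_headers : Prop := ∀ (text_lines : List String) (headers : List String), Dom_extract_text_by_headers text_lines headers → Pre_extract_text_by_headers text_lines headers → Spec_extract_text_by_headers text_lines headers (extract_text_by_headers text_lines headers)

-- ===== LEMMAS AND PROOFS =====

-- A's loop step on an already-stripped line
def pvStepA (headers : List String)
    (st : PySem.Dict String (List String) × String × List String) (line : String) :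
    PySem.Dict String (List String) × String × List String :=
  if line ∈ headers then
    ((if st.2.1 ≠ "" then st.1.insert st.2.1 st.2.2 else st.1), line, [])
  else if st.2.1 ≠ "" then (st.1, st.2.1, st.2.2 ++ [line])
  else st

-- A's trailing 'if current_header: store it'
def pvFinal (st : PySem.Dict String (List String) × String × List String) :
    PySem.Dict String (List String) :=
  if st.2.1 ≠ "" then st.1.insert st.2.1 st.2.2 else st.1

-- canonical (marker, body-below-it) pairs of a stripped line list, plus the prefix
-- of lines before the first marker
def pvSplit (headers : List String) (ls : List String) :
    List (String × List String) × List String :=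
  ls.foldr
    (fun s st =>
      if PySem.Set.contains (PySem.Set.ofList headers) s then ((s, st.2) :: st.1, [])
      else (st.1, s :: st.2))
    ([], [])

-- insert all pairs, skipping empty names (A's shape)
def pvInsertAllG (d : PySem.Dict String (List String))
    (ps : List (String × List String)) : PySem.Dict String (List String) :=
  ps.foldl (fun d p => if p.1 ≠ "" then d.insert p.1 p.2 else d) d

-- insert all pairs (B's shape)
def pvInsertAll (d : PySem.Dict String (List String))
    (ps : List (String × List String)) : PySem.Dict String (List String) :=
  ps.foldl (fun d p => d.insert p.1 p.2) d

-- marker positions of a stripped line list, as Nats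
def pvMarksN (headers : List String) : List String → List Nat
  | [] => []
  | l :: ls =>
      if l ∈ headers then 0 :: (pvMarksN headers ls).map (· + 1)
      else (pvMarksN headers ls).map (· + 1)

-- B's pair construction from a list of marker positions
def pvPairsN (ls : List String) (ms : List Nat) : List (String × List String) :=
  (ms.zip (ms.drop 1 ++ [ls.length])).map
    (fun p => (ls.getD p.1 "", (ls.drop (p.1 + 1)).take (p.2 - (p.1 + 1))))

-- A's loop from an arbitrary state = split-then-assign on the remaining lines
lemma pv_loop_eq (headers : List String) :
    ∀ (ls : List String) (d : PySem.Dict String (List String)) (cur : String) (txt : List String),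
      pvFinal (ls.foldl (pvStepA headers) (d, cur, txt))
        = pvInsertAllG (if cur ≠ "" then d.insert cur (txt ++ (pvSplit headers ls).2) else d)
            (pvSplit headers ls).1 := by
  intro ls
  induction ls with
  | nil =>
      intro d cur txt
      simp [pvFinal, pvSplit, pvInsertAllG]
  | cons l ls ih =>
      intro d cur txt
      have hsplit : pvSplit headers (l :: ls)
          = (if PySem.Set.contains (PySem.Set.ofList headers) l
              then (((l, (pvSplit headers ls).2) :: (pvSplit headers ls).1), ([] : List String))
              else ((pvSplit headers ls).1, l :: (pvSplit headers ls).2)) := by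
        simp [pvSplit]
      by_cases h : l ∈ headers
      · have hc : PySem.Set.contains (PySem.Set.ofList headers) l = true := by
          simp [PySem.Set.contains, PySem.Set.mem_ofList, h]
        rw [List.foldl_cons]
        have hstep : pvStepA headers (d, cur, txt) l
            = ((if cur ≠ "" then d.insert cur txt else d), l, []) := by
          simp [pvStepA, h]
        rw [hstep, ih]
        rw [hsplit]
        simp only [hc, if_true]
        by_cases hl : l = ""
        · subst hl
          simp [pvInsertAllG]
        · simp [pvInsertAllG, hl]
      · have hc : PySem.Set.contains (PySem.Set.ofList headers) l = false := by
          simp [PySem.Set.contains, PySem.Set.mem_ofList, h]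
        rw [List.foldl_cons]
        rw [hsplit]
        simp only [hc, Bool.false_eq_true, if_false]
        by_cases hcur : cur = ""
        · subst hcur
          have hstep : pvStepA headers (d, "", txt) l = (d, "", txt) := by
            simp [pvStepA, h]
          rw [hstep, ih]
          simp
        · have hstep : pvStepA headers (d, cur, txt) l = (d, cur, txt ++ [l]) := by
            simp [pvStepA, h, hcur]
          rw [hstep, ih]
          simp [hcur, List.append_assoc]

lemma pvA_eq (text_lines headers : List String) :
    extract_text_by_headers text_lines headers
      = (pvFinal ((text_lines.map PySem.Str.strip).foldl (pvStepA headers)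
          (PySem.Dict.empty, "", []))).items := by
  unfold extract_text_by_headers pvFinal
  rw [List.foldl_map]
  rfl

-- every pair name produced by pvSplit is a header and one of the lines
lemma pvSplit_names (headers : List String) :
    ∀ ls : List String, ∀ p ∈ (pvSplit headers ls).1, p.1 ∈ headers ∧ p.1 ∈ ls := by
  intro ls
  induction ls with
  | nil => intro p hp; simp [pvSplit] at hp
  | cons l ls ih =>
      intro p hp
      by_cases h : l ∈ headers
      · simp only [pvSplit, List.foldr_cons] at hp
        rw [show (List.foldr _ ([], []) ls) = pvSplit headers ls from rfl] at hp
        simp [PySem.Set.contains, PySem.Set.mem_ofList, h] at hp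
        rcases hp with hp | hp
        · rw [hp]; exact ⟨h, List.mem_cons_self⟩
        · exact ⟨(ih p hp).1, List.mem_cons_of_mem l (ih p hp).2⟩
      · simp only [pvSplit, List.foldr_cons] at hp
        rw [show (List.foldr _ ([], []) ls) = pvSplit headers ls from rfl] at hp
        simp [PySem.Set.contains, PySem.Set.mem_ofList, h] at hp
        exact ⟨(ih p hp).1, List.mem_cons_of_mem l (ih p hp).2⟩

-- when no pair name is empty the guard in pvInsertAllG is always true
lemma pvInsertAllG_eq (headers : List String)
    (ls : List String) (d : PySem.Dict String (List String))
    (hne : ∀ p ∈ (pvSplit headers ls).1, p.1 ≠ "") :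
    pvInsertAllG d (pvSplit headers ls).1 = pvInsertAll d (pvSplit headers ls).1 := by
  unfold pvInsertAllG pvInsertAll
  refine PySem.List.foldl_congr_mem _ _ _ _ ?_
  intro acc p hp
  simp [hne p hp]

-- the enumerate/filter marker list is pvMarksN, shifted by the start offset
lemma pvMarks_eq (headers : List String) :
    ∀ (ls : List String) (s : Int),
      ((PySem.List.enumerate ls s).filter
          (fun p => PySem.Set.contains (PySem.Set.ofList headers) p.2)).map Prod.fst
        = (pvMarksN headers ls).map (fun n : Nat => s + (n : Int)) := by
  intro ls
  induction ls with
  | nil => intro s; simp [PySem.List.enumerate, pvMarksN]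
  | cons l ls ih =>
      intro s
      rw [PySem.List.enumerate_cons, List.filter_cons]
      by_cases h : l ∈ headers
      · have hc : PySem.Set.contains (PySem.Set.ofList headers) l = true := by
          simp [PySem.Set.contains, PySem.Set.mem_ofList, h]
        simp only [hc, if_true, List.map_cons]
        rw [ih]
        simp only [pvMarksN, h, if_true, List.map_cons, List.map_map]
        congr 1
        · simp
        · apply List.map_congr_left
          intro n _
          simp only [Function.comp_apply]
          push_cast
          ring
      · have hc : PySem.Set.contains (PySem.Set.ofList headers) l = false := by
          simp [PySem.Set.contains, PySem.Set.mem_ofList, h]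
        simp only [hc, Bool.false_eq_true, if_false]
        rw [ih]
        simp only [pvMarksN, h, if_false, List.map_map]
        apply List.map_congr_left
        intro n _
        simp only [Function.comp_apply]
        push_cast
        ring

-- peel one marker off pvPairsN
lemma pvPairsN_cons (ls : List String) (a : Nat) (ms : List Nat) :
    pvPairsN ls (a :: ms)
      = (ls.getD a "", (ls.drop (a + 1)).take ((ms.headD ls.length) - (a + 1)))
          :: pvPairsN ls ms := by
  cases ms with
  | nil => simp [pvPairsN]
  | cons m t => simp [pvPairsN]

-- shifting every marker by one and prepending a line leaves the pairs unchanged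
lemma pvPairsN_shift (l : String) (ls : List String) (ms : List Nat) :
    pvPairsN (l :: ls) (ms.map (· + 1)) = pvPairsN ls ms := by
  unfold pvPairsN
  have hdrop : (ms.map (· + 1)).drop 1 = (ms.drop 1).map (· + 1) :=
    (List.map_drop).symm
  rw [hdrop]
  have happ : (ms.drop 1).map (· + 1) ++ [(l :: ls).length]
      = (ms.drop 1 ++ [ls.length]).map (· + 1) := by
    simp
  rw [happ, List.zip_map, List.map_map]
  apply List.map_congr_left
  intro p _
  cases p with
  | mk i e =>
      simp only [Function.comp, Prod.map, List.getD_cons_succ, List.drop_succ_cons]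
      congr 2
      omega

-- main invariant: B's pairing from the marker list is exactly pvSplit
lemma pv_pairs_eq (headers : List String) :
    ∀ ls : List String,
      pvPairsN ls (pvMarksN headers ls) = (pvSplit headers ls).1
        ∧ (pvSplit headers ls).2 = ls.take ((pvMarksN headers ls).headD ls.length) := by
  intro ls
  induction ls with
  | nil => constructor <;> simp [pvPairsN, pvMarksN, pvSplit]
  | cons l ls ih =>
      obtain ⟨ih1, ih2⟩ := ih
      have hsplit : pvSplit headers (l :: ls)
          = (if PySem.Set.contains (PySem.Set.ofList headers) l
              then (((l, (pvSplit headers ls).2) :: (pvSplit headers ls).1), ([] : List String))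
              else ((pvSplit headers ls).1, l :: (pvSplit headers ls).2)) := by
        simp [pvSplit]
      by_cases h : l ∈ headers
      · have hc : PySem.Set.contains (PySem.Set.ofList headers) l = true := by
          simp [PySem.Set.contains, PySem.Set.mem_ofList, h]
        rw [hsplit]
        simp only [hc, if_true, pvMarksN, h]
        constructor
        · rw [pvPairsN_cons, pvPairsN_shift, ih1]
          congr 1
          simp only [List.getD_cons_zero]
          congr 1
          rw [ih2]
          have hhead : ((pvMarksN headers ls).map (· + 1)).headD (l :: ls).length
              = (pvMarksN headers ls).headD ls.length + 1 := by
            cases pvMarksN headers ls <;> simp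
          rw [hhead]
          simp
        · simp
      · have hc : PySem.Set.contains (PySem.Set.ofList headers) l = false := by
          simp [PySem.Set.contains, PySem.Set.mem_ofList, h]
        rw [hsplit]
        simp only [hc, Bool.false_eq_true, if_false, pvMarksN, h]
        constructor
        · rw [pvPairsN_shift, ih1]
        · rw [ih2]
          have hhead : ((pvMarksN headers ls).map (· + 1)).headD (l :: ls).length
              = (pvMarksN headers ls).headD ls.length + 1 := by
            cases pvMarksN headers ls <;> simp
          rw [hhead]
          simp

-- B's port computes pvInsertAll over pvPairsN of pvMarksN
lemma pvB_eq (text_lines headers : List String) :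
    extract_text_by_headers_alt text_lines headers
      = (pvInsertAll PySem.Dict.empty
          (pvPairsN (text_lines.map PySem.Str.strip)
            (pvMarksN headers (text_lines.map PySem.Str.strip)))).items := by
  simp only [extract_text_by_headers_alt]
  set ls := text_lines.map PySem.Str.strip with hls
  have hmarks : ((PySem.List.enumerate ls).filter
        (fun p => PySem.Set.contains (PySem.Set.ofList headers) p.2)).map Prod.fst
      = (pvMarksN headers ls).map (fun n : Nat => (n : Int)) := by
    simpa using pvMarks_eq headers ls 0
  rw [hmarks, PySem.List.slice_from_one]
  have htail : ((pvMarksN headers ls).map (fun n : Nat => (n : Int))).tail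
      = ((pvMarksN headers ls).drop 1).map (fun n : Nat => (n : Int)) := by
    rw [← List.drop_one, List.map_drop]
  have happ : ((pvMarksN headers ls).drop 1).map (fun n : Nat => (n : Int)) ++ [(ls.length : Int)]
      = ((pvMarksN headers ls).drop 1 ++ [ls.length]).map (fun n : Nat => (n : Int)) := by
    simp
  rw [htail, happ, List.zip_map]
  unfold pvInsertAll pvPairsN
  rw [List.foldl_map, List.foldl_map]
  refine congrArg PySem.Dict.items (PySem.List.foldl_congr_mem _ _ _ _ ?_)
  intro d p _
  cases p with
  | mk i e =>
      simp only [Prod.map]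
      rw [PySem.List.pyGetD_natCast]
      have hcast : ((i : Int) + 1) = ((i + 1 : Nat) : Int) := by push_cast; ring
      rw [hcast, PySem.List.slice_natCast]

-- ===== VERDICT (by name: the statement is the Claim_ definition above) =====
theorem extract_text_by_headers_spec : Claim_equal_extract_text_by_headers := by
  intro text_lines headers _ hpre
  unfold Spec_extract_text_by_headers
  rw [pvA_eq, pv_loop_eq]
  simp only [ne_eq, not_true_eq_false, if_false]
  have hne : ∀ p ∈ (pvSplit headers (text_lines.map PySem.Str.strip)).1, p.1 ≠ "" := by
    intro p hp he
    obtain ⟨hH, hL⟩ := pvSplit_names headers (text_lines.map PySem.Str.strip) p hp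
    obtain ⟨l, hl, hsl⟩ := List.mem_map.mp hL
    exact hpre ⟨he ▸ hH, l, hl, by rw [hsl, he]⟩
  rw [pvInsertAllG_eq headers _ _ hne, pvB_eq,
    (pv_pairs_eq headers (text_lines.map PySem.Str.strip)).1]
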